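-- pv_equiv track=rewrite | github.com/AlexBulbasaur/MiniProjects | main.py | split_sequences
-- ===== SOURCE A (Python) =====
-- def split_sequences(data, data2):
--     """In column 1: Groups decreasing lines together. Groups increasing lines together.
--      It save the corresponding values from column 2 based on column 1"""
--     result = []
--     result2 = []
--     current_result = []
--     current_result2 = []
--     increasing = data[0] < data[1]
--     for i in range(0, len(data)):
--         current_result.append(data[i])
--         current_result2.append(data2[i])
--         if i + 1 >= len(data):
--             result.append(current_result)
--             result2.append(current_result2)
--             break
--
--         now_decreasing = increasing and data[i] > data[i + 1]
--         now_increasing = (not increasing) and data[i] < data[i + 1]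
--         sequence_flipped = now_decreasing or now_increasing
--
--         if sequence_flipped:
--             result.append(current_result)
--             result2.append(current_result2)
--             current_result = []
--             current_result2 = []
--             increasing = not increasing
--             continue
--
--     return result, result2
-- ===== SOURCE B (Python) =====
-- def split_sequences(data, data2):
--     """Same grouping as A, computed via cut indices and slicing instead of
--     threading four accumulators."""
--     increasing = data[0] < data[1]
--     cuts = [0]
--     for i in range(len(data) - 1):
--         if (increasing and data[i] > data[i + 1]) or \
--            (not increasing and data[i] < data[i + 1]):
--             cuts.append(i + 1)
--             increasing = not increasing
--     cuts.append(len(data))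
--     bounds = list(zip(cuts, cuts[1:]))
--     return ([data[a:b] for a, b in bounds],
--             [data2[a:b] for a, b in bounds])
-- ===== Notes on version B (the rewrite author's own statement) =====
-- stated objective: alternative
-- what changed: Instead of threading four accumulator lists through the index loop, B makes one pass over consecutive pairs collecting the flip cut indices, then builds both result columns by slicing data and data2 between successive cuts.
import Mathlib
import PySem

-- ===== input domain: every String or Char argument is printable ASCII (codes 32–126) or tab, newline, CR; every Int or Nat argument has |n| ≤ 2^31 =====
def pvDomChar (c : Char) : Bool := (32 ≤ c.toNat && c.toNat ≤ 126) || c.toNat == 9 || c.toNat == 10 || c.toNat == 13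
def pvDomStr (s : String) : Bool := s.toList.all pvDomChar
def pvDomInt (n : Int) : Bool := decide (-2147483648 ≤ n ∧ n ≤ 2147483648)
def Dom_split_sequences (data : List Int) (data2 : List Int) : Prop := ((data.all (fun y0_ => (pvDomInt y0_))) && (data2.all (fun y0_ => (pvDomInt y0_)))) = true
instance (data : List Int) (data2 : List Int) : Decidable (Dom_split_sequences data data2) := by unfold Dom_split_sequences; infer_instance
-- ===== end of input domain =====

-- B trades A's four threaded accumulator lists for a cut-index pass plus slicing; same cost, proven equal on Pre_.

-- ===== PORT A =====
-- literal port of A's for-loop: index i, flag `increasing`, current run and result accumulators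
def pvLoopA (data data2 : List Int) (inc : Bool) (cur cur2 : List Int)
    (res res2 : List (List Int)) (i : Nat) : List (List Int) × List (List Int) :=
  if _h : i < data.length then
    let cur' := cur ++ [PySem.List.pyGetD data (i : Int) 0]
    let cur2' := cur2 ++ [PySem.List.pyGetD data2 (i : Int) 0]
    if data.length ≤ i + 1 then
      (res ++ [cur'], res2 ++ [cur2'])
    else
      let nowDec := inc && decide (PySem.List.pyGetD data ((i : Int) + 1) 0 < PySem.List.pyGetD data (i : Int) 0)
      let nowInc := (!inc) && decide (PySem.List.pyGetD data (i : Int) 0 < PySem.List.pyGetD data ((i : Int) + 1) 0)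
      if nowDec || nowInc then
        pvLoopA data data2 (!inc) [] [] (res ++ [cur']) (res2 ++ [cur2']) (i + 1)
      else
        pvLoopA data data2 inc cur' cur2' res res2 (i + 1)
  else (res, res2)
termination_by data.length - i

def split_sequences (data : List Int) (data2 : List Int) : List (List Int) × List (List Int) :=
  pvLoopA data data2 (decide (PySem.List.pyGetD data 0 0 < PySem.List.pyGetD data 1 0)) [] [] [] [] 0

-- ===== PORT B =====
-- Source B's loop over i in range(len(data)-1) collecting cut indices into `cuts`
def pvCutsLoop (data : List Int) (inc : Bool) (acc : List Nat) (i : Nat) : List Nat :=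
  if i + 1 < data.length then
    if (inc && decide (PySem.List.pyGetD data ((i : Int) + 1) 0 < PySem.List.pyGetD data (i : Int) 0)) ||
       ((!inc) && decide (PySem.List.pyGetD data (i : Int) 0 < PySem.List.pyGetD data ((i : Int) + 1) 0)) then
      pvCutsLoop data (!inc) (acc ++ [i + 1]) (i + 1)
    else
      pvCutsLoop data inc acc (i + 1)
  else acc
termination_by data.length - i

def split_sequences_alt (data : List Int) (data2 : List Int) : List (List Int) × List (List Int) :=
  let inc := decide (PySem.List.pyGetD data 0 0 < PySem.List.pyGetD data 1 0)
  let cuts : List Nat := 0 :: (pvCutsLoop data inc [] 0 ++ [data.length])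
  let bounds := cuts.zip cuts.tail
  (bounds.map (fun p => PySem.List.slice data (some (p.1 : Int)) (some (p.2 : Int))),
   bounds.map (fun p => PySem.List.slice data2 (some (p.1 : Int)) (some (p.2 : Int))))

-- ===== PRECONDITION & SPEC =====
-- Pre_ excludes exactly the inputs where A raises IndexError: len(data) < 2 (data[1]) or data2 shorter than data (data2[i]).
def Pre_split_sequences (data : List Int) (data2 : List Int) : Prop :=
  2 ≤ data.length ∧ data.length ≤ data2.length
instance (data : List Int) (data2 : List Int) : Decidable (Pre_split_sequences data data2) := by
  unfold Pre_split_sequences; infer_instance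
def pvWitness_split_sequences : List Int × List Int := ([3, 1, 2], [10, 20, 30])

def Spec_split_sequences (data : List Int) (data2 : List Int) (out : List (List Int) × List (List Int)) : Prop := out = split_sequences_alt data data2
instance (data : List Int) (data2 : List Int) (out : List (List Int) × List (List Int)) : Decidable (Spec_split_sequences data data2 out) := by unfold Spec_split_sequences; infer_instance

-- ===== CLAIM (what is proved, stated in full; the proofs are below) =====
def Claim_equal_split_sequences : Prop := ∀ (data : List Int) (data2 : List Int), Dom_split_sequences data data2 → Pre_split_sequences data data2 → Spec_split_sequences data data2 (split_sequences data data2)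

-- ===== LEMMAS AND PROOFS =====

-- proof-only helper: the segments of xs between successive cut points, ending at L
def pvSegs (xs : List Int) (L : Nat) : Nat → List Nat → List (List Int)
  | start, [] => [(xs.drop start).take (L - start)]
  | start, c :: cs => (xs.drop start).take (c - start) :: pvSegs xs L c cs

lemma pvCutsLoop_acc (data : List Int) : ∀ n i inc acc, data.length - i ≤ n →
    pvCutsLoop data inc acc i = acc ++ pvCutsLoop data inc [] i := by
  intro n
  induction n with
  | zero =>
      intro i inc acc h
      conv_lhs => rw [pvCutsLoop]
      conv_rhs => rw [pvCutsLoop]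
      have hnlt : ¬ i + 1 < data.length := by omega
      simp [hnlt]
  | succ n ih =>
      intro i inc acc h
      conv_lhs => rw [pvCutsLoop]
      conv_rhs => rw [pvCutsLoop]
      by_cases hlt : i + 1 < data.length
      · simp only [hlt, if_true]
        split
        · rw [ih (i+1) (!inc) (acc ++ [i+1]) (by omega),
              ih (i+1) (!inc) ([] ++ [i+1]) (by omega)]
          simp
        · exact ih (i+1) inc acc (by omega)
      · simp [hlt]

lemma pvCuts_eq (data : List Int) (inc : Bool) (i : Nat) :
    pvCutsLoop data inc [] i =
      if i + 1 < data.length then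
        (if (inc && decide (PySem.List.pyGetD data ((i : Int) + 1) 0 < PySem.List.pyGetD data (i : Int) 0)) ||
            ((!inc) && decide (PySem.List.pyGetD data (i : Int) 0 < PySem.List.pyGetD data ((i : Int) + 1) 0)) then
          (i + 1) :: pvCutsLoop data (!inc) [] (i + 1)
        else pvCutsLoop data inc [] (i + 1))
      else [] := by
  conv_lhs => rw [pvCutsLoop]
  by_cases hlt : i + 1 < data.length
  · simp only [hlt, if_true]
    split
    · simp only [List.nil_append]
      rw [pvCutsLoop_acc data (data.length - (i+1)) (i+1) (!inc) [i+1] (by omega)]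
      rfl
    · rfl
  · simp [hlt]

-- appending the next element extends the taken prefix by one
lemma pvTake_snoc (xs : List Int) (start i : Nat) (hs : start ≤ i) (hi : i < xs.length) :
    (xs.drop start).take (i - start) ++ [PySem.List.pyGetD xs (i : Int) 0] =
      (xs.drop start).take (i + 1 - start) := by
  have h1 : i + 1 - start = (i - start) + 1 := by omega
  rw [h1, List.take_add_one]
  have h2 : (xs.drop start)[i - start]? = some xs[i] := by
    rw [List.getElem?_drop]
    have : start + (i - start) = i := by omega
    rw [this, List.getElem?_eq_getElem hi]
  rw [h2]
  have h3 : PySem.List.pyGetD xs (i : Int) 0 = xs[i] := by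
    rw [PySem.List.pyGetD_natCast]
    exact List.getD_eq_getElem xs 0 hi
  rw [h3]
  rfl

lemma pvLoopA_eq (data data2 : List Int) (hlen : data.length ≤ data2.length) :
    ∀ n i start inc res res2, data.length - i ≤ n → start ≤ i → i < data.length →
    pvLoopA data data2 inc ((data.drop start).take (i - start)) ((data2.drop start).take (i - start)) res res2 i =
      (res ++ pvSegs data data.length start (pvCutsLoop data inc [] i),
       res2 ++ pvSegs data2 data.length start (pvCutsLoop data inc [] i)) := by
  intro n
  induction n with
  | zero => intro i start inc res res2 h hs hi; omega
  | succ n ih =>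
      intro i start inc res res2 h hs hi
      rw [pvLoopA, pvCuts_eq]
      simp only [hi, dif_pos]
      rw [pvTake_snoc data start i hs hi, pvTake_snoc data2 start i hs (by omega)]
      by_cases hend : data.length ≤ i + 1
      · have hnlt : ¬ i + 1 < data.length := by omega
        simp only [hend, if_true, hnlt, if_false]
        have hL : i + 1 = data.length := by omega
        rw [hL]
        simp [pvSegs]
      · have hlt : i + 1 < data.length := by omega
        simp only [hend, if_false, hlt, if_true]
        split
        · have hih := ih (i+1) (i+1) (!inc) (res ++ [(data.drop start).take (i + 1 - start)])
                (res2 ++ [(data2.drop start).take (i + 1 - start)]) (by omega) (by omega) hlt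
          simp only [Nat.sub_self, List.take_zero] at hih
          rw [hih]
          simp [pvSegs]
        · rw [ih (i+1) start inc res res2 (by omega) (by omega) hlt]

lemma pvZip_segs (xs : List Int) (L : Nat) :
    ∀ (cuts : List Nat) (start : Nat),
      ((start :: (cuts ++ [L])).zip (cuts ++ [L])).map
          (fun p => PySem.List.slice xs (some (p.1 : Int)) (some (p.2 : Int))) =
        pvSegs xs L start cuts := by
  intro cuts
  induction cuts with
  | nil =>
      intro start
      simp [pvSegs, PySem.List.slice_natCast]
  | cons c cs ih =>
      intro start
      simp only [List.cons_append, List.zip_cons_cons, List.map_cons, pvSegs]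
      rw [← ih c]
      simp [PySem.List.slice_natCast]

-- ===== VERDICT (by name: the statement is the Claim_ definition above) =====
theorem split_sequences_spec : Claim_equal_split_sequences := by
  intro data data2 _hdom hpre
  obtain ⟨h2, hle⟩ := hpre
  unfold Spec_split_sequences split_sequences split_sequences_alt
  simp only [List.tail_cons]
  rw [pvZip_segs, pvZip_segs]
  have h0 : (0:Nat) < data.length := by omega
  have := pvLoopA_eq data data2 hle data.length 0 0
      (decide (PySem.List.pyGetD data 0 0 < PySem.List.pyGetD data 1 0)) [] []
      (by omega) (by omega) h0
  simpa using this
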